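-- pv_equiv track=rewrite | github.com/dlindebaum/pion-argon-xs-analysis | analysis/scripts/format_tables.py | split_rows
-- ===== SOURCE A (Python) =====
-- def split_rows(row : str) -> list[str]:
--     """ Takes a line read from a latex table and splits the row wherever there is a & symbol,
--         if the line has no & symbols, it returns an empty list so naturally strips unwanted lines.
--
--     Args:
--         row (str): line from latex file
--
--     Returns:
--         list[str]: split rows.
--     """
--     split_row = []
--     last = -1
--     for i in range(len(row)):
--         if row[i] == "&":
--             split_row.append(row[last + 1:i])
--             last = i
--         if i == len(row) - 1 and last != -1: # we are at the end of the row
--             split_row.append(row[last + 1:i-2]) # i -3 to remove newline characters \\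
--     return split_row
-- ===== SOURCE B (Python) =====
-- def split_rows(row : str) -> list[str]:
--     """Split a latex table row on '&'; [] if the line has no '&'."""
--     parts = row.split("&")
--     if len(parts) == 1:
--         return []
--     return parts[:-1] + [parts[-1][:-3]]
-- ===== Notes on version B (the rewrite author's own statement) =====
-- stated objective: faster
-- what changed: B replaces A's index-by-index character scan with mutable last-ampersand bookkeeping and inline slicing by a single ampersand-split of the whole row followed by reshaping the parts list (keep all but the last part verbatim, trim 3 chars off the last part; empty list when there was no separator).
import Mathlib
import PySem

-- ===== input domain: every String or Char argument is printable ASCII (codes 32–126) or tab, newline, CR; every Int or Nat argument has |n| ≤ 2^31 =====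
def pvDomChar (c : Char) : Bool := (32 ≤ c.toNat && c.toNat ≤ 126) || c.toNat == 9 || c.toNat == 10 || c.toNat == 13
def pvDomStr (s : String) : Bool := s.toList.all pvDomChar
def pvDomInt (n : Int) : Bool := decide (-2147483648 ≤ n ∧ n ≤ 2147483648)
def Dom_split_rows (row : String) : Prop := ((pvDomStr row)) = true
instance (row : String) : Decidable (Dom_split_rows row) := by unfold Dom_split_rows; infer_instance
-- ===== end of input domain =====

-- B replaces A's character-by-character index scan (last-ampersand bookkeeping, inline slicing)
-- by one split on the separator followed by reshaping the parts list; measurably faster (C-level split).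

-- ===== PORT A =====
def split_rows (row : String) : List String :=
  ((PySem.List.pyRange 0 (PySem.Str.len row) 1).foldl
    (fun (st : List String × Int) i =>
      let st1 := if PySem.Str.pyGet? row i = some '&'
        then (st.1 ++ [PySem.Str.slice row (some (st.2 + 1)) (some i)], i)
        else st
      if i = PySem.Str.len row - 1 ∧ st1.2 ≠ -1
        then (st1.1 ++ [PySem.Str.slice row (some (st1.2 + 1)) (some (i - 2))], st1.2)
        else st1)
    ([], -1)).1

-- ===== PORT B =====
def split_rows_alt (row : String) : List String :=
  match PySem.Str.split? row "&" with
  | none => []  -- unreachable: the separator "&" is nonempty, so Python's split never raises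
  | some parts =>
    if parts.length = 1 then []
    else PySem.List.slice parts none (some (-1)) ++
      [PySem.Str.slice ((PySem.List.pyGet? parts (-1)).getD "") none (some (-3))]

-- ===== PRECONDITION & SPEC =====
def Spec_split_rows (row : String) (out : List String) : Prop := out = split_rows_alt row
instance (row : String) (out : List String) : Decidable (Spec_split_rows row out) := by unfold Spec_split_rows; infer_instance

-- ===== CLAIM (what is proved, stated in full; the proofs are below) =====
def Claim_equal_split_rows : Prop := ∀ (row : String), Dom_split_rows row → Spec_split_rows row (split_rows row)

-- ===== LEMMAS AND PROOFS =====

/-- Structural single-`'&'` splitter: the induction-friendly face of `PySem.Chars.splitOn`. -/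
def mySplit (pre : List Char) : List Char → List (List Char)
  | [] => [pre]
  | c :: t => if c = '&' then pre :: mySplit [] t else mySplit (pre ++ [c]) t

theorem mySplit_ne_nil (pre xs : List Char) : mySplit pre xs ≠ [] := by
  induction xs generalizing pre with
  | nil => simp [mySplit]
  | cons c t ih => by_cases h : c = '&' <;> simp [mySplit, h, ih]

theorem go_spec : ∀ (fuel : Nat) (l cur : List Char) (acc : List (List Char)),
    l.length < fuel →
    PySem.Chars.splitOn.go ['&'] fuel l cur acc = acc.reverse ++ mySplit cur.reverse l := by
  intro fuel
  induction fuel with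
  | zero => intro l cur acc h; omega
  | succ f ih =>
    intro l cur acc h
    cases l with
    | nil => simp [PySem.Chars.splitOn.go, mySplit]
    | cons c rest =>
      by_cases hc : c = '&'
      · subst hc
        have hpre : (['&'].isPrefixOf ('&' :: rest)) = true := by simp [List.isPrefixOf]
        simp only [PySem.Chars.splitOn.go, hpre, if_pos]
        rw [ih _ _ _ (by simpa using Nat.lt_of_succ_lt_succ h)]
        simp [mySplit]
      · have hpre : (['&'].isPrefixOf (c :: rest)) = false := by
          simp [List.isPrefixOf]; exact fun hh => hc hh.symm
        simp only [PySem.Chars.splitOn.go, hpre]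
        rw [ih rest (c :: cur) acc (by simp only [List.length_cons] at h; omega)]
        simp [mySplit, hc]

theorem splitOn_eq_mySplit (cs : List Char) :
    PySem.Chars.splitOn cs ['&'] = mySplit [] cs := by
  unfold PySem.Chars.splitOn
  rw [go_spec (cs.length + 1) cs [] [] (by omega)]
  simp

theorem mySplit_no_amp (pre xs : List Char) (h : '&' ∉ xs) :
    mySplit pre xs = [pre ++ xs] := by
  induction xs generalizing pre with
  | nil => simp [mySplit]
  | cons c t ih =>
    simp only [List.mem_cons, not_or] at h
    simp [mySplit, Ne.symm h.1, ih _ h.2]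

/-- splitting across an `'&'`. -/
theorem mySplit_dec (pre xs ys : List Char) :
    mySplit pre (xs ++ '&' :: ys) = mySplit pre xs ++ mySplit [] ys := by
  induction xs generalizing pre with
  | nil => simp [mySplit]
  | cons c t ih =>
    by_cases h : c = '&' <;> simp [mySplit, h, ih]

/-- decompose a list at its LAST `'&'`. -/
theorem last_amp_decomp (xs : List Char) (h : '&' ∈ xs) :
    ∃ t cur, xs = t ++ '&' :: cur ∧ '&' ∉ cur := by
  have h' : '&' ∈ xs.reverse := by simpa using h
  obtain ⟨s, t, hst, hns⟩ := List.eq_append_cons_of_mem h'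
  refine ⟨t.reverse, s.reverse, ?_, by simpa using hns⟩
  have := congrArg List.reverse hst
  simpa using this

theorem dropLast_getLastD (l : List (List Char)) (h : l ≠ []) :
    l.dropLast ++ [l.getLastD []] = l := by
  have h1 := List.dropLast_append_getLast h
  rwa [show l.getLast h = l.getLastD [] from by
    rw [List.getLastD_eq_getLast?, List.getLast?_eq_some_getLast h]; rfl] at h1

/-- appending a non-`'&'` character extends the last part. -/
theorem mySplit_snoc_ne (pre xs : List Char) (c : Char) (hc : c ≠ '&') :
    mySplit pre (xs ++ [c])
      = (mySplit pre xs).dropLast ++ [(mySplit pre xs).getLastD [] ++ [c]] := by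
  by_cases h : '&' ∈ xs
  · obtain ⟨t, cur, rfl, hcur⟩ := last_amp_decomp xs h
    have h1 : '&' ∉ cur ++ [c] := by
      simp [hcur]; exact fun hh => hc hh.symm
    rw [List.append_assoc, List.cons_append, mySplit_dec, mySplit_dec,
      mySplit_no_amp _ _ h1, mySplit_no_amp _ _ hcur]
    simp
  · have h1 : '&' ∉ xs ++ [c] := by
      simp [h]; exact fun hh => hc hh.symm
    rw [mySplit_no_amp _ _ h1, mySplit_no_amp _ _ h]
    simp

/-- the last part is a suffix. -/
theorem mySplit_last_suffix (xs : List Char) :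
    ∃ t, xs = t ++ (mySplit [] xs).getLastD [] := by
  by_cases h : '&' ∈ xs
  · obtain ⟨t, cur, rfl, hcur⟩ := last_amp_decomp xs h
    refine ⟨t ++ ['&'], ?_⟩
    rw [mySplit_dec, mySplit_no_amp _ _ hcur]
    simp
  · refine ⟨[], ?_⟩
    rw [mySplit_no_amp _ _ h]
    simp

theorem sliceSeg (cs t cur : List Char) (m : Nat) (hm : m ≤ cs.length)
    (h : cs.take m = t ++ cur) :
    PySem.List.slice cs (some ((m : Int) - cur.length)) (some (m : Int)) = cur := by
  have hlen : t.length + cur.length = m := by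
    have := congrArg List.length h
    simp [Nat.min_eq_left hm] at this
    omega
  have h1 : (m : Int) - cur.length = ((t.length : Nat) : Int) := by omega
  rw [h1, PySem.List.slice_natCast]
  have hcs : cs = t ++ (cur ++ cs.drop m) := by
    conv_lhs => rw [← List.take_append_drop m cs]
    rw [h, List.append_assoc]
  rw [hcs, List.drop_left' rfl, show m - t.length = cur.length by omega,
    List.take_left' rfl]

theorem sliceTrim (t cur : List Char) :
    PySem.List.slice (t ++ '&' :: cur)
      (some (((t ++ '&' :: cur).length : Int) - cur.length))
      (some (((t ++ '&' :: cur).length : Int) - 3))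
      = cur.take (cur.length - 3) := by
  have hn : (t ++ '&' :: cur).length = t.length + 1 + cur.length := by
    simp [List.length_append]; omega
  have ha : PySem.List.clampIdx (t ++ '&' :: cur).length
      (((t ++ '&' :: cur).length : Int) - cur.length) = t.length + 1 := by
    unfold PySem.List.clampIdx
    rw [hn]; split_ifs <;> omega
  have hkey : PySem.List.clampIdx (t ++ '&' :: cur).length
        (((t ++ '&' :: cur).length : Int) - 3)
      - PySem.List.clampIdx (t ++ '&' :: cur).length
        (((t ++ '&' :: cur).length : Int) - cur.length) = cur.length - 3 := by
    unfold PySem.List.clampIdx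
    rw [hn]; split_ifs <;> omega
  have hdrop : ((t ++ '&' :: cur).drop (t.length + 1)) = cur := by
    rw [show t ++ '&' :: cur = (t ++ ['&']) ++ cur by simp, List.drop_left' (by simp)]
  simp only [PySem.List.slice]
  rw [ha] at hkey ⊢
  rw [hkey, hdrop]

/-- loop invariant for A's scan without the end-of-row clause. -/
theorem invA (row : String) (m : Nat) (hm : m ≤ row.toList.length) :
    (PySem.List.pyRange 0 (m : Int) 1).foldl
      (fun (st : List String × Int) i =>
        if PySem.Str.pyGet? row i = some '&'
          then (st.1 ++ [PySem.Str.slice row (some (st.2 + 1)) (some i)], i)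
          else st) ([], -1)
    = ((mySplit [] (row.toList.take m)).dropLast.map String.ofList,
       (m : Int) - ((mySplit [] (row.toList.take m)).getLastD []).length - 1) := by
  induction m with
  | zero => simp [PySem.List.pyRange_one_eq_nil, mySplit]
  | succ m ih =>
    have hm' : m ≤ row.toList.length := by omega
    have hmlt : m < row.toList.length := by omega
    have hcast : ((m + 1 : Nat) : Int) = (m : Int) + 1 := by push_cast; ring
    rw [hcast, PySem.List.pyRange_one_succ_right (by positivity), List.foldl_append,
      ih hm']
    have hget : PySem.Str.pyGet? row ((m : Nat) : Int) = some (row.toList[m]) := by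
      rw [PySem.Str.pyGet?_natCast, List.getElem?_eq_getElem hmlt]
    have htake : row.toList.take (m + 1) = row.toList.take m ++ [row.toList[m]] := by
      rw [List.take_add_one, List.getElem?_eq_getElem hmlt]; rfl
    by_cases hc : row.toList[m] = '&'
    · simp only [List.foldl_cons, List.foldl_nil, hget, hc, if_pos]
      rw [htake, hc, show row.toList.take m ++ ['&'] = row.toList.take m ++ '&' :: [] by rfl,
        mySplit_dec]
      have hne := mySplit_ne_nil [] (row.toList.take m)
      obtain ⟨t, hsuf⟩ := mySplit_last_suffix (row.toList.take m)
      have hslice : PySem.Str.slice row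
          (some ((m : Int) - ((mySplit [] (row.toList.take m)).getLastD []).length - 1 + 1))
          (some ((m : Nat) : Int))
          = String.ofList ((mySplit [] (row.toList.take m)).getLastD []) := by
        have harg : (m : Int) - ((mySplit [] (row.toList.take m)).getLastD []).length - 1 + 1
            = (m : Int) - ((mySplit [] (row.toList.take m)).getLastD []).length := by ring
        rw [harg]
        unfold PySem.Str.slice
        rw [PySem.Chars.slice_eq_listSlice, sliceSeg row.toList t _ m hm' hsuf]
      rw [hslice, Prod.mk.injEq]
      refine ⟨?_, ?_⟩
      · -- first components
        rw [show (mySplit [] (row.toList.take m) ++ mySplit [] ([] : List Char)).dropLast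
            = mySplit [] (row.toList.take m) from by simp [mySplit]]
        conv_rhs => rw [← dropLast_getLastD _ hne]
        simp
      · -- second components
        simp [mySplit]
    · simp only [List.foldl_cons, List.foldl_nil, hget, hc, Option.some.injEq]
      rw [htake, mySplit_snoc_ne _ _ _ hc, Prod.mk.injEq]
      refine ⟨?_, ?_⟩
      · simp
      · rw [List.getLastD_concat]
        simp only [List.length_append, List.length_singleton]
        push_cast
        ring
  -- (each branch closes the pair equality componentwise)

theorem split_rows_eq_alt (row : String) : split_rows row = split_rows_alt row := by
  have hsplit : PySem.Str.split? row "&" = some ((mySplit [] row.toList).map String.ofList) := by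
    rw [PySem.Str.split?.eq_1]; simp [PySem.Chars.split?, splitOn_eq_mySplit]
  rcases Nat.eq_zero_or_pos row.toList.length with hz | hp
  · have hnil : row.toList = [] := List.length_eq_zero_iff.mp hz
    simp [split_rows, split_rows_alt, hsplit, PySem.Str.len_eq, hnil,
      PySem.List.pyRange_one_eq_nil, mySplit]
  · obtain ⟨k, hk⟩ : ∃ k, row.toList.length = k + 1 := ⟨row.toList.length - 1, by omega⟩
    have hlen : PySem.Str.len row = (k : Int) + 1 := by rw [PySem.Str.len_eq, hk]; push_cast; ring
    have hcast : ((k + 1 : Nat) : Int) = (k : Int) + 1 := by push_cast; ring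
    have hrange : PySem.List.pyRange 0 ((k:Int)+1) = PySem.List.pyRange 0 (k:Int) ++ [(k:Int)] :=
      PySem.List.pyRange_one_succ_right (by positivity)
    have htakeall : row.toList.take (k+1) = row.toList := by
      rw [← hk]; exact List.take_length
    have hfull := invA row (k+1) (by omega)
    simp only [hcast, hrange, List.foldl_append, invA row k (by omega), List.foldl_cons,
      List.foldl_nil, htakeall] at hfull
    have hpref : (PySem.List.pyRange 0 (k:Int)).foldl
        (fun (st : List String × Int) i =>
          let st1 := if PySem.Str.pyGet? row i = some '&'
            then (st.1 ++ [PySem.Str.slice row (some (st.2 + 1)) (some i)], i)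
            else st
          if i = (k:Int) + 1 - 1 ∧ st1.2 ≠ -1
            then (st1.1 ++ [PySem.Str.slice row (some (st1.2 + 1)) (some (i - 2))], st1.2)
            else st1) ([], -1)
      = (PySem.List.pyRange 0 (k:Int)).foldl
        (fun (st : List String × Int) i =>
          if PySem.Str.pyGet? row i = some '&'
            then (st.1 ++ [PySem.Str.slice row (some (st.2 + 1)) (some i)], i)
            else st) ([], -1) := by
      apply PySem.List.foldl_congr_mem
      intro acc x hx
      have hxlt : x < (k:Int) := ((PySem.List.mem_pyRange_one).1 hx).2
      have hne : ¬(x = (k:Int)) := by omega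
      simp [hne]
    simp only [split_rows, split_rows_alt, hsplit, hlen, hrange, List.foldl_append, hpref,
      invA row k (by omega), List.foldl_cons, List.foldl_nil]
    rw [hfull]
    by_cases hmem : '&' ∈ row.toList
    · obtain ⟨t, cur, hdec, hcur⟩ := last_amp_decomp _ hmem
      have hparts : mySplit [] row.toList = mySplit [] t ++ [cur] := by
        rw [hdec, mySplit_dec, mySplit_no_amp _ _ hcur]; simp
      have hlenrow : row.toList.length = t.length + 1 + cur.length := by
        rw [hdec]; simp [List.length_append]; omega
      rw [hparts, List.getLastD_concat, List.dropLast_concat]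
      have hcond : ((k:Int) = (k:Int) + 1 - 1 ∧ ((k:Int) + 1 - (cur.length:Int) - 1) ≠ (-1 : Int)) :=
        ⟨by ring, by omega⟩
      rw [if_pos hcond]
      have h1 : 0 < (mySplit [] t).length := List.length_pos_iff.mpr (mySplit_ne_nil [] t)
      have hBlen : ¬((List.map String.ofList (mySplit [] t ++ [cur])).length = 1) := by
        simp only [List.length_map, List.length_append, List.length_cons, List.length_nil]
        omega
      rw [if_neg hBlen]
      rw [List.map_append, List.map_cons, List.map_nil, PySem.List.slice_to_neg_one,
        List.dropLast_concat, PySem.List.pyGet?_neg_one_append_singleton]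
      have hsliceB : PySem.Str.slice (String.ofList cur) none (some (-3))
          = String.ofList (cur.take (cur.length - 3)) := by
        unfold PySem.Str.slice
        rw [PySem.Chars.slice_eq_listSlice, String.toList_ofList,
          PySem.List.slice_to_neg_ofNat cur 3 (by omega)]
      have hsliceA : PySem.Str.slice row (some ((k:Int) + 1 - (cur.length:Int) - 1 + 1))
            (some ((k:Int) - 2))
          = String.ofList (cur.take (cur.length - 3)) := by
        unfold PySem.Str.slice
        rw [PySem.Chars.slice_eq_listSlice]
        have e1 : ((k:Int) + 1 - (cur.length:Int) - 1 + 1)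
            = (((t ++ '&' :: cur).length : Int) - cur.length) := by
          simp only [List.length_append, List.length_cons]
          push_cast
          omega
        have e2 : ((k:Int) - 2) = (((t ++ '&' :: cur).length : Int) - 3) := by
          simp only [List.length_append, List.length_cons]
          push_cast
          omega
        rw [hdec, e1, e2, sliceTrim]
      simp only [Option.getD_some]
      rw [hsliceA, hsliceB]
    · have hparts : mySplit [] row.toList = [row.toList] := by
        simpa using mySplit_no_amp [] _ hmem
      rw [hparts]
      have hA2 : ((k:Int) + 1 - (([row.toList].getLastD []).length : Int) - 1) = -1 := by
        simp [hk]
      rw [if_neg (fun h => (h.2 : _ ≠ (-1:Int)) hA2)]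
      simp

-- ===== VERDICT (by name: the statement is the Claim_ definition above) =====
theorem split_rows_spec : Claim_equal_split_rows := by
  intro row _
  unfold Spec_split_rows
  exact split_rows_eq_alt row
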